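-- pv_equiv track=rewrite | github.com/mrraghur/interviewpreptests | May2022/PaintingTheFence/main.py | solutionGold
-- ===== SOURCE A (Python) =====
-- def solutionGold(n,k):
--     if n==0:
--         return 0
--     if n==1:
--         return k
--     if n==2:
--         return k*k
--     dp = [0] * (n + 1)
--     total = k
--     mod = 1000000007
--
--     dp[1] = k
--     dp[2] = k * k
--
--     for i in range(3,n+1):
--         dp[i] = ((k - 1) * (dp[i - 1] + dp[i - 2])) % mod
--
--     return dp[n]
-- ===== SOURCE B (Python) =====
-- def solutionGold(n, k):
--     if n == 0:
--         return 0
--     if n == 1: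
--         return k
--     if n == 2:
--         return k * k
--     p = 1000000007
--     c = (k - 1) % p
--
--     def mul(x, y):
--         xa, xb, xc, xd = x
--         ya, yb, yc, yd = y
--         return ((xa * ya + xb * yc) % p, (xa * yb + xb * yd) % p,
--                 (xc * ya + xd * yc) % p, (xc * yb + xd * yd) % p)
--
--     res = (1, 0, 0, 1)
--     base = (c, c, 1, 0)
--     e = n - 2
--     while e > 0:
--         if e & 1:
--             res = mul(res, base)
--         base = mul(base, base)
--         e >>= 1
--     f2 = (k * k) % p
--     f1 = k % p
--     return (res[0] * f2 + res[1] * f1) % p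
-- ===== Notes on version B (the rewrite author's own statement) =====
-- stated objective: faster
-- what changed: Replaced the O(n) dp-array recurrence with 2x2 companion-matrix exponentiation by squaring mod 1000000007, O(log n); Pre_ excludes n < 0, where A raises IndexError (dp is the empty list).
import Mathlib
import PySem

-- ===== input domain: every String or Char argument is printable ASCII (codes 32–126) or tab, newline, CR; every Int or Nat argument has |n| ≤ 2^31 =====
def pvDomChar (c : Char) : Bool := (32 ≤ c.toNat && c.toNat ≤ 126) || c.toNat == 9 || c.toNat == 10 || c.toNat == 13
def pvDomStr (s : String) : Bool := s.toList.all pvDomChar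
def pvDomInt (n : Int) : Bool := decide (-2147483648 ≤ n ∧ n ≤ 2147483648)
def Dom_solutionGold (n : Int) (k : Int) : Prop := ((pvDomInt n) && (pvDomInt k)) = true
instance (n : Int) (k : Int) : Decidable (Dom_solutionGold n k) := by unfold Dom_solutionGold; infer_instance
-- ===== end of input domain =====

-- B replaces A's O(n) dp-array recurrence by 2x2 companion-matrix exponentiation by squaring mod 1000000007 (O(log n)).

-- ===== PORT A =====
-- literal transliteration of A; the dead local 'total = k' is dropped.
-- Python's list dp is an Array here; the indices 1, 2, i, i-1, i-2, n are all nonnegative and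
-- in range on Pre_ (3 ≤ i ≤ n in the loop), so setIfInBounds/getD/.toNat are exact here.
def solutionGold (n : Int) (k : Int) : Int :=
  if n == 0 then 0
  else if n == 1 then k
  else if n == 2 then k * k
  else
    let dp := Array.replicate (n + 1).toNat (0 : Int)
    let dp := dp.setIfInBounds 1 k
    let dp := dp.setIfInBounds 2 (k * k)
    let dp := (PySem.List.pyRange 3 (n + 1) 1).foldl
      (fun dp i => dp.setIfInBounds i.toNat
        (PySem.Int.mod ((k - 1) * (dp.getD (i - 1).toNat 0 + dp.getD (i - 2).toNat 0)) 1000000007)) dp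
    dp.getD n.toNat 0

-- ===== PORT B =====
-- 2x2 matrix as a quadruple (row-major); multiplication taken mod p, as in Source B
def sgMul (p : Int) (x y : Int × Int × Int × Int) : Int × Int × Int × Int :=
  (PySem.Int.mod (x.1 * y.1 + x.2.1 * y.2.2.1) p,
   PySem.Int.mod (x.1 * y.2.1 + x.2.1 * y.2.2.2) p,
   PySem.Int.mod (x.2.2.1 * y.1 + x.2.2.2 * y.2.2.1) p,
   PySem.Int.mod (x.2.2.1 * y.2.1 + x.2.2.2 * y.2.2.2) p)

-- Source B's 'while e > 0' loop; e = n-2 ≥ 1 there, so Nat exponent is exact (e & 1 = e % 2, e >>= 1 = e / 2)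
def sgLoop (p : Int) (res base : Int × Int × Int × Int) (e : Nat) : Int × Int × Int × Int :=
  if h : e = 0 then res
  else sgLoop p (if e % 2 = 1 then sgMul p res base else res) (sgMul p base base) (e / 2)
termination_by e
decreasing_by exact Nat.div_lt_self (Nat.pos_of_ne_zero h) one_lt_two

def solutionGold_alt (n : Int) (k : Int) : Int :=
  if n == 0 then 0
  else if n == 1 then k
  else if n == 2 then k * k
  else
    let p : Int := 1000000007
    let c := PySem.Int.mod (k - 1) p
    let res := sgLoop p (1, 0, 0, 1) (c, c, 1, 0) (n - 2).toNat
    let f2 := PySem.Int.mod (k * k) p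
    let f1 := PySem.Int.mod k p
    PySem.Int.mod (res.1 * f2 + res.2.1 * f1) p

-- ===== PRECONDITION & SPEC =====
-- Pre_ excludes n < 0, where A raises IndexError (dp = [0]*(n+1) is empty, dp[1] = k fails).
def Pre_solutionGold (n : Int) (k : Int) : Prop := 0 ≤ n
instance (n : Int) (k : Int) : Decidable (Pre_solutionGold n k) := by unfold Pre_solutionGold; infer_instance
def pvWitness_solutionGold : Int × Int := (5, 3)

def Spec_solutionGold (n : Int) (k : Int) (out : Int) : Prop := out = solutionGold_alt n k
instance (n : Int) (k : Int) (out : Int) : Decidable (Spec_solutionGold n k out) := by unfold Spec_solutionGold; infer_instance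

-- ===== CLAIM (what is proved, stated in full; the proofs are below) =====
def Claim_equal_solutionGold : Prop := ∀ (n : Int) (k : Int), Dom_solutionGold n k → Pre_solutionGold n k → Spec_solutionGold n k (solutionGold n k)

-- ===== LEMMAS AND PROOFS =====

def sgP : Int := 1000000007

-- A's dp recurrence as a sequence (seeds unreduced, exactly as A stores them)
def aSeq (k : Int) : Nat → Int
  | 0 => 0
  | 1 => k
  | 2 => k * k
  | (m + 3) => ((k - 1) * (aSeq k (m + 2) + aSeq k (m + 1))) % sgP

-- pure (mod-free) sequence with reduced seeds and coefficient; B's matrix acts on this one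
def wSeq (k : Int) : Nat → Int
  | 0 => 0
  | 1 => k % sgP
  | 2 => (k * k) % sgP
  | (m + 3) => ((k - 1) % sgP) * (wSeq k (m + 2) + wSeq k (m + 1))

-- pure matrix algebra
def pmul (x y : Int × Int × Int × Int) : Int × Int × Int × Int :=
  (x.1 * y.1 + x.2.1 * y.2.2.1,
   x.1 * y.2.1 + x.2.1 * y.2.2.2,
   x.2.2.1 * y.1 + x.2.2.2 * y.2.2.1,
   x.2.2.1 * y.2.1 + x.2.2.2 * y.2.2.2)

def ppow (b : Int × Int × Int × Int) : Nat → Int × Int × Int × Int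
  | 0 => (1, 0, 0, 1)
  | (e + 1) => pmul (ppow b e) b

def vapp (x : Int × Int × Int × Int) (v : Int × Int) : Int × Int :=
  (x.1 * v.1 + x.2.1 * v.2, x.2.2.1 * v.1 + x.2.2.2 * v.2)

-- entrywise congruence mod sgP
def mEq (x y : Int × Int × Int × Int) : Prop :=
  x.1 ≡ y.1 [ZMOD sgP] ∧ x.2.1 ≡ y.2.1 [ZMOD sgP] ∧ x.2.2.1 ≡ y.2.2.1 [ZMOD sgP] ∧ x.2.2.2 ≡ y.2.2.2 [ZMOD sgP]

theorem sg_mod_eq (a : Int) : PySem.Int.mod a sgP = a % sgP := by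
  exact PySem.Int.mod_eq_emod_of_pos (by norm_num [sgP])

theorem emod_modEq (a : Int) : a % sgP ≡ a [ZMOD sgP] := by
  unfold Int.ModEq
  exact Int.emod_emod_of_dvd a dvd_rfl

theorem pmul_assoc (x y z : Int × Int × Int × Int) : pmul (pmul x y) z = pmul x (pmul y z) := by
  simp only [pmul, Prod.mk.injEq]
  refine ⟨by ring, by ring, by ring, by ring⟩

theorem pmul_one_right (x : Int × Int × Int × Int) : pmul x (1, 0, 0, 1) = x := by
  simp [pmul]

theorem sg_ppow_add (b : Int × Int × Int × Int) (e1 e2 : Nat) :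
    ppow b (e1 + e2) = pmul (ppow b e1) (ppow b e2) := by
  induction e2 with
  | zero => simp [ppow, pmul_one_right]
  | succ e ih =>
      show ppow b (e1 + e + 1) = _
      simp only [ppow, ih, pmul_assoc]

theorem sg_ppow_sq (b : Int × Int × Int × Int) (q : Nat) :
    ppow (pmul b b) q = ppow b (2 * q) := by
  induction q with
  | zero => rfl
  | succ q ih =>
      have h2 : 2 * (q + 1) = 2 * q + 1 + 1 := by omega
      rw [h2]
      simp only [ppow, ih]
      rw [pmul_assoc]

theorem mEq_refl (x : Int × Int × Int × Int) : mEq x x :=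
  ⟨Int.ModEq.refl _, Int.ModEq.refl _, Int.ModEq.refl _, Int.ModEq.refl _⟩

theorem sgMul_mEq {x x' y y' : Int × Int × Int × Int} (hx : mEq x x') (hy : mEq y y') :
    mEq (sgMul sgP x y) (pmul x' y') := by
  obtain ⟨hx1, hx2, hx3, hx4⟩ := hx
  obtain ⟨hy1, hy2, hy3, hy4⟩ := hy
  refine ⟨?_, ?_, ?_, ?_⟩ <;>
    simp only [sgMul, pmul, sg_mod_eq] <;>
    exact (emod_modEq _).trans (Int.ModEq.add (Int.ModEq.mul ‹_› ‹_›) (Int.ModEq.mul ‹_› ‹_›))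

theorem sgLoop_mEq (e : Nat) : ∀ (res base res' base' : Int × Int × Int × Int),
    mEq res res' → mEq base base' →
    mEq (sgLoop sgP res base e) (pmul res' (ppow base' e)) := by
  induction e using Nat.strong_induction_on with
  | _ e ih =>
    intro res base res' base' hres hbase
    by_cases h0 : e = 0
    · subst h0
      rw [sgLoop, dif_pos rfl, ppow, pmul_one_right]
      exact hres
    · rw [sgLoop, dif_neg h0]
      have hdiv : e / 2 < e := Nat.div_lt_self (Nat.pos_of_ne_zero h0) one_lt_two
      have hbase2 : mEq (sgMul sgP base base) (pmul base' base') := sgMul_mEq hbase hbase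
      by_cases hpar : e % 2 = 1
      · rw [if_pos hpar]
        have := ih (e / 2) hdiv (sgMul sgP res base) (sgMul sgP base base)
          (pmul res' base') (pmul base' base') (sgMul_mEq hres hbase) hbase2
        have heq : pmul (pmul res' base') (ppow (pmul base' base') (e / 2)) =
            pmul res' (ppow base' e) := by
          rw [sg_ppow_sq, pmul_assoc]
          congr 1
          rw [show pmul base' (ppow base' (2 * (e/2))) = pmul (ppow base' 1) (ppow base' (2 * (e/2))) by
                simp [ppow, pmul],
              ← sg_ppow_add]
          congr 1
          omega
        rwa [heq] at this
      · rw [if_neg hpar]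
        have := ih (e / 2) hdiv res (sgMul sgP base base) res' (pmul base' base') hres hbase2
        have heq : pmul res' (ppow (pmul base' base') (e / 2)) = pmul res' (ppow base' e) := by
          rw [sg_ppow_sq]
          congr 2
          omega
        rwa [heq] at this

theorem vapp_pmul (x y : Int × Int × Int × Int) (v : Int × Int) :
    vapp (pmul x y) v = vapp x (vapp y v) := by
  simp only [vapp, pmul, Prod.mk.injEq]
  exact ⟨by ring, by ring⟩

-- the companion matrix advances the w-sequence by one step
theorem vapp_companion (k : Int) (m : Nat) :
    vapp ((k - 1) % sgP, (k - 1) % sgP, 1, 0) (wSeq k (m + 2), wSeq k (m + 1)) =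
      (wSeq k (m + 3), wSeq k (m + 2)) := by
  simp only [vapp, Prod.mk.injEq]
  constructor
  · show ((k-1) % sgP) * wSeq k (m+2) + ((k-1) % sgP) * wSeq k (m+1) = wSeq k (m+3)
    rw [show wSeq k (m+3) = ((k - 1) % sgP) * (wSeq k (m + 2) + wSeq k (m + 1)) from rfl]
    ring
  · ring

theorem vapp_ppow (k : Int) (e : Nat) : ∀ m : Nat,
    vapp (ppow ((k - 1) % sgP, (k - 1) % sgP, 1, 0) e) (wSeq k (m + 2), wSeq k (m + 1)) =
      (wSeq k (e + m + 2), wSeq k (e + m + 1)) := by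
  induction e with
  | zero => intro m; simp [ppow, vapp]
  | succ e ih =>
      intro m
      rw [show ppow ((k-1) % sgP, (k-1) % sgP, 1, 0) (e+1) =
            pmul (ppow ((k-1) % sgP, (k-1) % sgP, 1, 0) e) ((k-1) % sgP, (k-1) % sgP, 1, 0) from rfl,
          vapp_pmul, vapp_companion, show (m + 3) = (m + 1) + 2 from rfl,
          show (m + 2) = (m + 1) + 1 from rfl, ih (m + 1),
          show e + 1 + m + 2 = e + (m + 1) + 2 by omega,
          show e + 1 + m + 1 = e + (m + 1) + 1 by omega]

-- aSeq and wSeq agree mod sgP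
theorem aSeq_modEq_wSeq (k : Int) : ∀ m : Nat, aSeq k m ≡ wSeq k m [ZMOD sgP] := by
  intro m
  induction m using Nat.strong_induction_on with
  | _ m ih =>
    match m with
    | 0 => exact Int.ModEq.refl _
    | 1 => exact (emod_modEq k).symm
    | 2 => exact (emod_modEq (k * k)).symm
    | (m + 3) =>
        show ((k - 1) * (aSeq k (m + 2) + aSeq k (m + 1))) % sgP ≡
          ((k - 1) % sgP) * (wSeq k (m + 2) + wSeq k (m + 1)) [ZMOD sgP]
        exact (emod_modEq _).trans
          (Int.ModEq.mul (emod_modEq (k - 1)).symm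
            (Int.ModEq.add (ih (m + 2) (by omega)) (ih (m + 1) (by omega))))

-- aSeq values from index 3 on are already reduced
theorem aSeq_emod_fix (k : Int) (m : Nat) : aSeq k (m + 3) % sgP = aSeq k (m + 3) := by
  show ((k - 1) * (aSeq k (m + 2) + aSeq k (m + 1))) % sgP % sgP = _
  exact Int.emod_emod_of_dvd _ dvd_rfl

-- ===== A-side loop characterization =====

def sgStep (k : Int) (dp : List Int) (i : Int) : List Int :=
  PySem.List.pySetD dp i
    (PySem.Int.mod ((k - 1) * (PySem.List.pyGetD dp (i - 1) 0 + PySem.List.pyGetD dp (i - 2) 0)) 1000000007)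

def sgDp0 (N : Nat) (k : Int) : List Int :=
  PySem.List.pySetD (PySem.List.pySetD (List.replicate (N + 1) (0 : Int)) 1 k) 2 (k * k)

theorem getD_set_self (l : List Int) (i : Nat) (v d : Int) (h : i < l.length) :
    (l.set i v).getD i d = v := by
  simp [List.getD, h]

theorem getD_set_ne (l : List Int) (i j : Nat) (v d : Int) (h : i ≠ j) :
    (l.set i v).getD j d = l.getD j d := by
  simp [List.getD, List.getElem?_set_ne h]

theorem pmul_one_left (x : Int × Int × Int × Int) : pmul (1, 0, 0, 1) x = x := by
  simp [pmul]

theorem sgDp0_set (N : Nat) (k : Int) :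
    sgDp0 N k = ((List.replicate (N + 1) (0 : Int)).set 1 k).set 2 (k * k) := by
  unfold sgDp0
  rw [PySem.List.pySetD_of_nonneg (i := 1) _ _ (by norm_num),
      PySem.List.pySetD_of_nonneg (i := 2) _ _ (by norm_num)]
  rfl

theorem sgDp0_length (N : Nat) (k : Int) : (sgDp0 N k).length = N + 1 := by
  simp [sgDp0_set]

theorem sgDp0_getD_one (N : Nat) (k : Int) (hN : 3 ≤ N) : (sgDp0 N k).getD 1 0 = k := by
  rw [sgDp0_set, getD_set_ne _ 2 1 _ _ (by omega),
      getD_set_self _ _ _ _ (by simp; omega)]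

theorem sgDp0_getD_two (N : Nat) (k : Int) (hN : 3 ≤ N) : (sgDp0 N k).getD 2 0 = k * k := by
  rw [sgDp0_set, getD_set_self _ _ _ _ (by simp; omega)]

theorem sgLoopInv (k : Int) (N : Nat) (hN : 3 ≤ N) : ∀ (j : Nat), 3 ≤ j → j ≤ N →
    ((PySem.List.pyRange 3 ((j : Int) + 1) 1).foldl (sgStep k) (sgDp0 N k)).length = N + 1 ∧
    ((PySem.List.pyRange 3 ((j : Int) + 1) 1).foldl (sgStep k) (sgDp0 N k)).getD j 0 = aSeq k j ∧
    ((PySem.List.pyRange 3 ((j : Int) + 1) 1).foldl (sgStep k) (sgDp0 N k)).getD (j - 1) 0 = aSeq k (j - 1) := by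
  intro j
  induction j with
  | zero => omega
  | succ j ih =>
    intro h3 hjN
    by_cases hj3 : j = 2
    · -- base case: j + 1 = 3, range is [3]
      subst hj3
      have hr : PySem.List.pyRange 3 (((2 + 1 : Nat) : Int) + 1) 1 = [3] := by
        have := PySem.List.pyRange_one_singleton (3 : Int)
        norm_num at this ⊢
        exact this
      rw [hr]
      simp only [List.foldl_cons, List.foldl_nil, sgStep]
      have hget1 : PySem.List.pyGetD (sgDp0 N k) ((3:Int) - 1) 0 = k * k := by
        rw [show ((3:Int) - 1) = ((2 : Nat) : Int) by norm_num, PySem.List.pyGetD_natCast]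
        exact sgDp0_getD_two N k hN
      have hget2 : PySem.List.pyGetD (sgDp0 N k) ((3:Int) - 2) 0 = k := by
        rw [show ((3:Int) - 2) = ((1 : Nat) : Int) by norm_num, PySem.List.pyGetD_natCast]
        exact sgDp0_getD_one N k hN
      rw [hget1, hget2,
          show (3:Int) = ((3 : Nat) : Int) by norm_num, PySem.List.pySetD_natCast]
      have hlen : (sgDp0 N k).length = N + 1 := sgDp0_length N k
      refine ⟨by simp [hlen], ?_, ?_⟩
      · rw [getD_set_self _ _ _ _ (by omega)]
        rw [show (1000000007 : Int) = sgP from rfl, sg_mod_eq]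
        rfl
      · rw [getD_set_ne _ _ _ _ _ (by omega)]
        show (sgDp0 N k).getD 2 0 = aSeq k 2
        exact sgDp0_getD_two N k hN
    · -- step case: j ≥ 3
      have hj3' : 3 ≤ j := by omega
      obtain ⟨ihlen, ihj, ihj1⟩ := ih hj3' (by omega)
      have hsplit : PySem.List.pyRange 3 (((j + 1 : Nat) : Int) + 1) 1 =
          PySem.List.pyRange 3 ((j : Int) + 1) 1 ++ [(j : Int) + 1] := by
        have h := PySem.List.pyRange_one_succ_right (a := 3) (b := (j : Int) + 1)
          (by omega)
        rw [show (((j + 1 : Nat) : Int) + 1) = ((j : Int) + 1) + 1 by push_cast; ring]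
        exact h
      rw [hsplit, List.foldl_append]
      set D := (PySem.List.pyRange 3 ((j : Int) + 1) 1).foldl (sgStep k) (sgDp0 N k) with hD
      simp only [List.foldl_cons, List.foldl_nil, sgStep]
      have hg1 : PySem.List.pyGetD D ((j : Int) + 1 - 1) 0 = aSeq k j := by
        rw [show ((j : Int) + 1 - 1) = ((j : Nat) : Int) by ring, PySem.List.pyGetD_natCast]
        exact ihj
      have hg2 : PySem.List.pyGetD D ((j : Int) + 1 - 2) 0 = aSeq k (j - 1) := by
        rw [show ((j : Int) + 1 - 2) = ((j - 1 : Nat) : Int) by push_cast [Nat.cast_sub (by omega : 1 ≤ j)]; ring,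
            PySem.List.pyGetD_natCast]
        exact ihj1
      rw [hg1, hg2,
          show ((j : Int) + 1) = ((j + 1 : Nat) : Int) by push_cast; ring,
          PySem.List.pySetD_natCast]
      have hval : PySem.Int.mod ((k - 1) * (aSeq k j + aSeq k (j - 1))) 1000000007 = aSeq k (j + 1) := by
        rw [show (1000000007 : Int) = sgP from rfl]
        rw [sg_mod_eq]
        have hj1 : j + 1 = (j - 2) + 3 := by omega
        rw [hj1, show aSeq k ((j-2)+3) = ((k - 1) * (aSeq k ((j-2) + 2) + aSeq k ((j-2) + 1))) % sgP from rfl,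
            show (j - 2) + 2 = j by omega, show (j - 2) + 1 = j - 1 by omega]
      rw [hval]
      refine ⟨by simp [ihlen], ?_, ?_⟩
      · exact getD_set_self _ _ _ _ (by omega)
      · rw [getD_set_ne _ _ _ _ _ (by omega)]
        simpa using ihj

-- ===== bridge: the Array dp of port A projects to the List dp of the invariant =====

def sgStepA (k : Int) (dp : Array Int) (i : Int) : Array Int :=
  dp.setIfInBounds i.toNat
    (PySem.Int.mod ((k - 1) * (dp.getD (i - 1).toNat 0 + dp.getD (i - 2).toNat 0)) 1000000007)

theorem arr_getD (a : Array Int) (i : Nat) (d : Int) : a.getD i d = a.toList.getD i d := by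
  simp [Array.getD, List.getD]
  split_ifs with h
  · simp [h]
  · rw [Array.getElem?_eq_none (by simpa using Nat.le_of_not_lt h)]
    rfl

theorem pyGetD_nonneg (xs : List Int) (i : Int) (h : 0 ≤ i) (d : Int) :
    PySem.List.pyGetD xs i d = xs.getD i.toNat d := by
  rcases Int.eq_ofNat_of_zero_le h with ⟨m, rfl⟩
  simp [PySem.List.pyGetD_natCast]

theorem stepA_toList (k : Int) (dp : Array Int) (i : Int) (hi : 2 ≤ i) :
    (sgStepA k dp i).toList = sgStep k dp.toList i := by
  unfold sgStepA sgStep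
  rw [Array.toList_setIfInBounds, PySem.List.pySetD_of_nonneg _ _ (by omega : (0:Int) ≤ i),
      arr_getD, arr_getD, pyGetD_nonneg _ _ (by omega), pyGetD_nonneg _ _ (by omega)]

theorem fold_toList (k : Int) : ∀ (is : List Int), (∀ i ∈ is, 2 ≤ i) → ∀ (a : Array Int),
    (is.foldl (sgStepA k) a).toList = is.foldl (sgStep k) a.toList := by
  intro is
  induction is with
  | nil => intro _ a; rfl
  | cons i is ih =>
      intro hmem a
      simp only [List.foldl_cons]
      rw [ih (fun j hj => hmem j (List.mem_cons_of_mem i hj))]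
      rw [stepA_toList k a i (hmem i List.mem_cons_self)]

-- ===== final assembly =====

theorem solutionGold_eq_aSeq (n k : Int) (h3 : 3 ≤ n) : solutionGold n k = aSeq k n.toNat := by
  have h0 : (n == 0) = false := by simp; omega
  have h1 : (n == 1) = false := by simp; omega
  have h2 : (n == 2) = false := by simp; omega
  rw [solutionGold]
  simp only [h0, h1, h2, Bool.false_eq_true, if_false]
  set N := n.toNat with hN
  have hN3 : 3 ≤ N := by omega
  have e1 : (n + 1).toNat = N + 1 := by omega
  have e2 : n = (N : Int) := by omega
  rw [e1, e2]
  show ((PySem.List.pyRange 3 ((N : Int) + 1) 1).foldl (sgStepA k)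
      (((Array.replicate (N + 1) (0 : Int)).setIfInBounds 1 k).setIfInBounds 2 (k * k))).getD N 0
      = aSeq k N
  rw [arr_getD, fold_toList k _ (fun i hi => by
        have := (PySem.List.mem_pyRange_one.mp hi).1; omega)]
  simp only [Array.toList_setIfInBounds, Array.toList_replicate]
  rw [← sgDp0_set]
  obtain ⟨-, hj, -⟩ := sgLoopInv k N hN3 N hN3 le_rfl
  exact hj

theorem solutionGold_alt_eq_aSeq (n k : Int) (h3 : 3 ≤ n) : solutionGold_alt n k = aSeq k n.toNat := by
  have h0 : (n == 0) = false := by simp; omega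
  have h1 : (n == 1) = false := by simp; omega
  have h2 : (n == 2) = false := by simp; omega
  rw [solutionGold_alt]
  simp only [h0, h1, h2, Bool.false_eq_true, if_false]
  rw [show (1000000007 : Int) = sgP from rfl]
  simp only [sg_mod_eq]
  set e := (n - 2).toNat with hedef
  have he1 : 1 ≤ e := by omega
  have he : e + 2 = n.toNat := by omega
  have hm := sgLoop_mEq e (1, 0, 0, 1) ((k - 1) % sgP, (k - 1) % sgP, 1, 0)
      (1, 0, 0, 1) ((k - 1) % sgP, (k - 1) % sgP, 1, 0) (mEq_refl _) (mEq_refl _)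
  rw [pmul_one_left] at hm
  obtain ⟨hA, hB, -, -⟩ := hm
  have hv := congrArg Prod.fst (vapp_ppow k e 0)
  simp only [vapp] at hv
  have hX : (sgLoop sgP (1, 0, 0, 1) ((k - 1) % sgP, (k - 1) % sgP, 1, 0) e).1 * ((k * k) % sgP) +
      (sgLoop sgP (1, 0, 0, 1) ((k - 1) % sgP, (k - 1) % sgP, 1, 0) e).2.1 * (k % sgP) ≡
      wSeq k (e + 2) [ZMOD sgP] := by
    have := Int.ModEq.add (hA.mul (Int.ModEq.refl ((k * k) % sgP)))
      (hB.mul (Int.ModEq.refl (k % sgP)))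
    refine this.trans ?_
    rw [show (k * k) % sgP = wSeq k 2 from rfl, show k % sgP = wSeq k 1 from rfl]
    rw [show wSeq k 2 = wSeq k (0 + 2) from rfl, show wSeq k 1 = wSeq k (0 + 1) from rfl, hv]
  calc ((sgLoop sgP (1, 0, 0, 1) ((k - 1) % sgP, (k - 1) % sgP, 1, 0) e).1 * ((k * k) % sgP) +
        (sgLoop sgP (1, 0, 0, 1) ((k - 1) % sgP, (k - 1) % sgP, 1, 0) e).2.1 * (k % sgP)) % sgP
      = wSeq k (e + 2) % sgP := hX
    _ = aSeq k (e + 2) % sgP := (aSeq_modEq_wSeq k (e + 2)).symm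
    _ = aSeq k (e + 2) := by rw [show e + 2 = (e - 1) + 3 by omega]; exact aSeq_emod_fix k (e - 1)
    _ = aSeq k n.toNat := by rw [he]

-- ===== VERDICT (by name: the statement is the Claim_ definition above) =====
theorem solutionGold_spec : Claim_equal_solutionGold := by
  intro n k _hDom hPre
  show solutionGold n k = solutionGold_alt n k
  by_cases h0 : n = 0
  · subst h0; rfl
  · by_cases h1 : n = 1
    · subst h1; rfl
    · by_cases h2 : n = 2
      · subst h2; rfl
      · have h3 : 3 ≤ n := by
          have : (0:Int) ≤ n := hPre
          omega
        rw [solutionGold_eq_aSeq n k h3, solutionGold_alt_eq_aSeq n k h3]
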